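-- pv_equiv track=rewrite | github.com/omaregeh/odd-product-identity | plot_multiple_N.py | valid_sequences
-- ===== SOURCE A (Python) =====
-- import math
--
-- def valid_sequences(N, max_m=None):
--     if max_m is None:
--         max_m = int(math.isqrt(2*N)) + 2
--     results = []
--     for m in range(1, max_m + 1):
--         numerator = N - m*(m-1)
--         if numerator < 0:
--             break
--         if numerator % m == 0:
--             s = numerator // m
--             if s > 0 and s % 2 == 1:
--                 results.append((N, m, s))
--     return results
-- ===== SOURCE B (Python) =====
-- import math
--
-- def valid_sequences(N, max_m=None):
--     if max_m is None:
--         max_m = int(math.isqrt(2 * N)) + 2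
--     if N <= 0:
--         return []
--     divisors = set()
--     d = 1
--     while d * d <= N:
--         if N % d == 0:
--             divisors.add(d)
--             divisors.add(N // d)
--         d += 1
--     results = []
--     for m in sorted(divisors):
--         if m <= max_m and m * (m - 1) <= N:
--             s = N // m - (m - 1)
--             if s > 0 and s % 2 == 1:
--                 results.append((N, m, s))
--     return results
-- ===== Notes on version B (the rewrite author's own statement) =====
-- stated objective: alternative
-- what changed: A scans m = 1,2,... up to max_m with a break; B enumerates the divisors of N by trial division up to sqrt(N) into a set, sorts them, and filters each divisor against the same bounds and odd-quotient condition.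
import Mathlib
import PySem

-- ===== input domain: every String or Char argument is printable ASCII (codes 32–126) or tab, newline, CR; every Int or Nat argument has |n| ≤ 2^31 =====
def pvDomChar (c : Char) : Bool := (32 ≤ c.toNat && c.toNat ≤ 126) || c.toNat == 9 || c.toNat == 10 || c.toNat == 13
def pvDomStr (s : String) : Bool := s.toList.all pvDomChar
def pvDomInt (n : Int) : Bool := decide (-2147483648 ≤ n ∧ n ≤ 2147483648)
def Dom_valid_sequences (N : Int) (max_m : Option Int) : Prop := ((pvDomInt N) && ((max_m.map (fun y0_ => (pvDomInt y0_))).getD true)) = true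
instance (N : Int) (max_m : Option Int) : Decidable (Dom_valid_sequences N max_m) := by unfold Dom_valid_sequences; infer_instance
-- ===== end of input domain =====

-- B replaces A's linear scan over m = 1, 2, … (with a break) by trial-division divisor
-- enumeration up to √N followed by a sort of the divisor set: a different algorithm of
-- similar cost (objective: alternative; no speed claim).

-- ===== PORT A =====
-- A's for-loop with break, as structural recursion on m (m runs 1 .. M, breaks when numerator < 0)
def vsLoopA (N M m : Int) (results : List (Int × Int × Int)) : List (Int × Int × Int) :=
  if h : m ≤ M then
    let numerator := N - m * (m - 1)
    if numerator < 0 then results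
    else
      let results' :=
        if PySem.Int.mod numerator m = 0 then
          let s := PySem.Int.floordiv numerator m
          if 0 < s ∧ PySem.Int.mod s 2 = 1 then results ++ [(N, m, s)] else results
        else results
      vsLoopA N M (m + 1) results'
  else results
termination_by (M + 1 - m).toNat
decreasing_by omega

-- math.isqrt ported by hand as Nat.sqrt on toNat: exact for 0 ≤ N (guaranteed by Pre_ when max_m is None)
def valid_sequences (N : Int) (max_m : Option Int) : List (Int × Int × Int) :=
  let M : Int := match max_m with
    | none => (Nat.sqrt (2 * N).toNat : Int) + 2
    | some v => v
  vsLoopA N M 1 []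

-- ===== PORT B =====
-- trial division: for d = 1, 2, … while d*d <= N, collect divisors d and N//d into a set
-- ('1 ≤ d' in the guard is a totality guard only: the loop is entered with d = 1 and d only grows)
def vsDivLoop (N d : Int) (divisors : PySem.Set Int) : PySem.Set Int :=
  if h : 1 ≤ d ∧ d * d ≤ N then
    let divisors' :=
      if PySem.Int.mod N d = 0 then
        PySem.Set.add (PySem.Set.add divisors d) (PySem.Int.floordiv N d)
      else divisors
    vsDivLoop N (d + 1) divisors'
  else divisors
termination_by (N + 1 - d).toNat
decreasing_by
  have h1 : d ≤ d * d := le_mul_of_one_le_left (by omega) h.1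
  omega

def valid_sequences_alt (N : Int) (max_m : Option Int) : List (Int × Int × Int) :=
  let M : Int := match max_m with
    | none => (Nat.sqrt (2 * N).toNat : Int) + 2
    | some v => v
  if N ≤ 0 then []
  else
    let divisors := vsDivLoop N 1 PySem.Set.empty
    (PySem.List.sorted divisors (fun x => x) false).foldl
      (fun results m =>
        if m ≤ M ∧ m * (m - 1) ≤ N then
          let s := PySem.Int.floordiv N m - (m - 1)
          if 0 < s ∧ PySem.Int.mod s 2 = 1 then results ++ [(N, m, s)] else results
        else results) []

-- ===== PRECONDITION & SPEC =====
-- Pre_ excludes only the inputs where the Python A raises: max_m=None with N < 0 (math.isqrt ValueError).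
def Pre_valid_sequences (N : Int) (max_m : Option Int) : Prop := max_m = none → 0 ≤ N
instance (N : Int) (max_m : Option Int) : Decidable (Pre_valid_sequences N max_m) := by unfold Pre_valid_sequences; infer_instance
def pvWitness_valid_sequences : Int × Option Int := (45, none)

def Spec_valid_sequences (N : Int) (max_m : Option Int) (out : List (Int × Int × Int)) : Prop := out = valid_sequences_alt N max_m
instance (N : Int) (max_m : Option Int) (out : List (Int × Int × Int)) : Decidable (Spec_valid_sequences N max_m out) := by unfold Spec_valid_sequences; infer_instance

-- ===== CLAIM (what is proved, stated in full; the proofs are below) =====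
def Claim_equal_valid_sequences : Prop := ∀ (N : Int) (max_m : Option Int), Dom_valid_sequences N max_m → Pre_valid_sequences N max_m → Spec_valid_sequences N max_m (valid_sequences N max_m)

-- ===== LEMMAS AND PROOFS =====

-- the value s = N//m - (m-1) and the selection predicate both programs realise
def vsS (N m : Int) : Int := N / m - (m - 1)
def vsGd (N M m : Int) : Prop :=
  1 ≤ m ∧ m ≤ M ∧ m * (m - 1) ≤ N ∧ N % m = 0 ∧ 0 < vsS N m ∧ vsS N m % 2 = 1

-- strict order on the middle component of the output triples
def vsR (a b : Int × Int × Int) : Prop := a.2.1 < b.2.1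

lemma vsGd_mono (m m' : Int) (h1 : 1 ≤ m) (h2 : m ≤ m') : m * (m - 1) ≤ m' * (m' - 1) := by
  nlinarith

lemma vsGd_le_N {N M m : Int} (h : vsGd N M m) : m ≤ N := by
  obtain ⟨h1, -, -, -, hs, -⟩ := h
  have h2 : 1 ≤ N / m := by unfold vsS at hs; omega
  have h3 := (Int.le_ediv_iff_mul_le (by omega : (0:Int) < m)).mp h2
  omega

lemma vs_mod_eq (N m : Int) (hm : 1 ≤ m) : PySem.Int.mod (N - m * (m - 1)) m = N % m := by
  rw [PySem.Int.mod_eq_emod_of_pos (by omega : (0:Int) < m)]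
  have h : N - m * (m - 1) = N + m * (-(m - 1)) := by ring
  rw [h, Int.add_mul_emod_self_left]

lemma vs_div_eq (N m : Int) (hm : 1 ≤ m) :
    PySem.Int.floordiv (N - m * (m - 1)) m = vsS N m := by
  rw [PySem.Int.floordiv_eq_ediv_of_pos (by omega : (0:Int) < m)]
  have h : N - m * (m - 1) = N + m * (-(m - 1)) := by ring
  rw [h, Int.add_mul_ediv_left _ _ (by omega : m ≠ 0)]
  unfold vsS; ring

lemma vsLoopA_append (N M : Int) : ∀ m (acc : List (Int × Int × Int)),
    vsLoopA N M m acc = acc ++ vsLoopA N M m [] := by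
  suffices H : ∀ k m (acc : List (Int × Int × Int)), (M + 1 - m).toNat = k →
      vsLoopA N M m acc = acc ++ vsLoopA N M m [] by
    intro m acc; exact H _ m acc rfl
  intro k
  induction k using Nat.strong_induction_on with
  | _ k ih =>
    intro m acc hk
    rw [vsLoopA, vsLoopA]
    by_cases hm : m ≤ M
    · simp only [dif_pos hm]
      by_cases hneg : N - m * (m - 1) < 0
      · simp only [if_pos hneg, List.append_nil]
      · simp only [if_neg hneg]
        have hrec : (M + 1 - (m + 1)).toNat < k := by omega
        rw [ih _ hrec (m + 1) _ rfl, ih _ hrec (m + 1)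
          (if PySem.Int.mod (N - m * (m - 1)) m = 0 then
             (if 0 < PySem.Int.floordiv (N - m * (m - 1)) m ∧
                 PySem.Int.mod (PySem.Int.floordiv (N - m * (m - 1)) m) 2 = 1 then
               ([] : List (Int × Int × Int)) ++ [(N, m, PySem.Int.floordiv (N - m * (m - 1)) m)]
             else [])
           else []) rfl]
        split_ifs <;> simp
    · simp only [dif_neg hm, List.append_nil]

lemma vsLoopA_mem (N M : Int) : ∀ m, 1 ≤ m → ∀ x,
    (x ∈ vsLoopA N M m [] ↔ ∃ m', m ≤ m' ∧ vsGd N M m' ∧ x = (N, m', vsS N m')) := by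
  suffices H : ∀ k m, (M + 1 - m).toNat = k → 1 ≤ m → ∀ x,
      (x ∈ vsLoopA N M m [] ↔ ∃ m', m ≤ m' ∧ vsGd N M m' ∧ x = (N, m', vsS N m')) by
    intro m hm x; exact H _ m rfl hm x
  intro k
  induction k using Nat.strong_induction_on with
  | _ k ih =>
    intro m hk hm x
    rw [vsLoopA]
    by_cases hM : m ≤ M
    · simp only [dif_pos hM]
      by_cases hneg : N - m * (m - 1) < 0
      · simp only [if_pos hneg, List.not_mem_nil, false_iff]
        rintro ⟨m', hmm', ⟨h1, h2, h3, -⟩, -⟩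
        have := vsGd_mono m m' hm hmm'
        omega
      · simp only [if_neg hneg]
        rw [vsLoopA_append, List.mem_append]
        rw [ih (M + 1 - (m + 1)).toNat (by omega) (m + 1) rfl (by omega) x]
        have hsplit : (x ∈ if PySem.Int.mod (N - m * (m - 1)) m = 0 then
              (if 0 < PySem.Int.floordiv (N - m * (m - 1)) m ∧
                  PySem.Int.mod (PySem.Int.floordiv (N - m * (m - 1)) m) 2 = 1 then
                ([] : List (Int × Int × Int)) ++ [(N, m, PySem.Int.floordiv (N - m * (m - 1)) m)]
              else [])
            else []) ↔ (vsGd N M m ∧ x = (N, m, vsS N m)) := by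
          rw [vs_mod_eq N m hm, vs_div_eq N m hm,
            PySem.Int.mod_eq_emod_of_pos (by omega : (0:Int) < 2)]
          unfold vsGd
          split_ifs with c1 c2 <;> simp <;> omega
        rw [hsplit]
        constructor
        · rintro (⟨hg, hx⟩ | ⟨m', h1, h2, h3⟩)
          · exact ⟨m, le_refl m, hg, hx⟩
          · exact ⟨m', by omega, h2, h3⟩
        · rintro ⟨m', h1, h2, h3⟩
          by_cases hem : m' = m
          · subst hem; exact Or.inl ⟨h2, h3⟩
          · exact Or.inr ⟨m', by omega, h2, h3⟩
    · simp only [dif_neg hM, List.not_mem_nil, false_iff]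
      rintro ⟨m', hmm', ⟨-, h2, -⟩, -⟩
      omega

lemma vsLoopA_pairwise (N M : Int) : ∀ m, 1 ≤ m → (vsLoopA N M m []).Pairwise vsR := by
  suffices H : ∀ k m, (M + 1 - m).toNat = k → 1 ≤ m → (vsLoopA N M m []).Pairwise vsR by
    intro m hm; exact H _ m rfl hm
  intro k
  induction k using Nat.strong_induction_on with
  | _ k ih =>
    intro m hk hm
    rw [vsLoopA]
    by_cases hM : m ≤ M
    · simp only [dif_pos hM]
      by_cases hneg : N - m * (m - 1) < 0
      · simp [hneg]
      · simp only [if_neg hneg]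
        rw [vsLoopA_append, List.pairwise_append]
        refine ⟨?_, ih (M + 1 - (m + 1)).toNat (by omega) (m + 1) rfl (by omega), ?_⟩
        · split_ifs <;> simp
        · intro a ha b hb
          obtain ⟨m', hm', -, hbx⟩ := (vsLoopA_mem N M (m + 1) (by omega) b).mp hb
          have ha' : a.2.1 = m := by split_ifs at ha <;> simp at ha <;> simp [ha]
          unfold vsR
          rw [ha', hbx]
          simpa using by omega
    · simp [hM]

lemma vsDivLoop_nodup (N : Int) : ∀ d (s : PySem.Set Int), s.Nodup → (vsDivLoop N d s).Nodup := by
  suffices H : ∀ k d (s : PySem.Set Int), (N + 1 - d).toNat = k → s.Nodup →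
      (vsDivLoop N d s).Nodup by
    intro d s hs; exact H _ d s rfl hs
  intro k
  induction k using Nat.strong_induction_on with
  | _ k ih =>
    intro d s hk hs
    rw [vsDivLoop]
    by_cases hg : 1 ≤ d ∧ d * d ≤ N
    · simp only [dif_pos hg]
      have hd : d ≤ d * d := le_mul_of_one_le_left (by omega) hg.1
      refine ih (N + 1 - (d + 1)).toNat (by omega) (d + 1) _ rfl ?_
      split_ifs
      · exact PySem.Set.nodup_add _ _ (PySem.Set.nodup_add _ _ hs)
      · exact hs
    · simp only [dif_neg hg]; exact hs

lemma vsDivLoop_mem (N : Int) : ∀ d (s : PySem.Set Int), 1 ≤ d → ∀ x,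
    (x ∈ vsDivLoop N d s ↔ x ∈ s ∨ ∃ e, d ≤ e ∧ e * e ≤ N ∧ N % e = 0 ∧ (x = e ∨ x = N / e)) := by
  suffices H : ∀ k d (s : PySem.Set Int), (N + 1 - d).toNat = k → 1 ≤ d → ∀ x,
      (x ∈ vsDivLoop N d s ↔ x ∈ s ∨ ∃ e, d ≤ e ∧ e * e ≤ N ∧ N % e = 0 ∧ (x = e ∨ x = N / e)) by
    intro d s hd x; exact H _ d s rfl hd x
  intro k
  induction k using Nat.strong_induction_on with
  | _ k ih =>
    intro d s hk hd x
    rw [vsDivLoop]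
    by_cases hg : 1 ≤ d ∧ d * d ≤ N
    · simp only [dif_pos hg]
      have hdd : d ≤ d * d := le_mul_of_one_le_left (by omega) hg.1
      rw [ih (N + 1 - (d + 1)).toNat (by omega) (d + 1) _ rfl (by omega) x]
      have hmodconv : PySem.Int.mod N d = N % d :=
        PySem.Int.mod_eq_emod_of_pos (by omega : (0:Int) < d)
      have hdivconv : PySem.Int.floordiv N d = N / d :=
        PySem.Int.floordiv_eq_ediv_of_pos (by omega : (0:Int) < d)
      constructor
      · rintro (hmem | ⟨e, h1, h2, h3, h4⟩)
        · split_ifs at hmem with hdvd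
          · rw [PySem.Set.mem_add, PySem.Set.mem_add] at hmem
            rcases hmem with (hmem | heq) | heq
            · exact Or.inl hmem
            · exact Or.inr ⟨d, le_refl d, hg.2, by omega, Or.inl heq⟩
            · exact Or.inr ⟨d, le_refl d, hg.2, by omega, Or.inr (by rw [heq, hdivconv])⟩
          · exact Or.inl hmem
        · exact Or.inr ⟨e, by omega, h2, h3, h4⟩
      · rintro (hmem | ⟨e, h1, h2, h3, h4⟩)
        · refine Or.inl ?_
          split_ifs
          · rw [PySem.Set.mem_add, PySem.Set.mem_add]; exact Or.inl (Or.inl hmem)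
          · exact hmem
        · by_cases he : e = d
          · subst he
            refine Or.inl ?_
            have hdvd : PySem.Int.mod N e = 0 := by omega
            rw [if_pos hdvd, PySem.Set.mem_add, PySem.Set.mem_add, hdivconv]
            rcases h4 with rfl | rfl
            · exact Or.inl (Or.inr rfl)
            · exact Or.inr rfl
          · exact Or.inr ⟨e, by omega, h2, h3, h4⟩
    · simp only [dif_neg hg]
      have hdd : N < d * d := by
        rcases not_and_or.mp hg with h | h
        · omega
        · omega
      constructor
      · exact Or.inl
      · rintro (hmem | ⟨e, h1, h2, -, -⟩)
        · exact hmem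
        · exfalso; nlinarith

-- the divisor set holds exactly the divisors of N in [1, N]  (for N ≥ 1)
lemma vsDiv_char (N : Int) (hN : 1 ≤ N) (x : Int) :
    x ∈ vsDivLoop N 1 PySem.Set.empty ↔ x ∣ N ∧ 1 ≤ x ∧ x ≤ N := by
  rw [vsDivLoop_mem N 1 PySem.Set.empty (le_refl 1) x]
  constructor
  · rintro (hmem | ⟨e, h1, h2, h3, h4⟩)
    · simp [PySem.Set.empty] at hmem
    · have hdvd : e ∣ N := Int.dvd_of_emod_eq_zero h3
      have heN : e ≤ N := le_trans (le_mul_of_one_le_left (by omega) h1) h2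
      rcases h4 with rfl | rfl
      · exact ⟨hdvd, h1, heN⟩
      · have hq : N / e * e = N := Int.ediv_mul_cancel hdvd
        refine ⟨⟨e, by omega⟩, ?_, Int.ediv_le_self e (by omega)⟩
        rw [Int.le_ediv_iff_mul_le (by omega : (0:Int) < e)]
        omega
  · rintro ⟨hdvd, h1, h2⟩
    refine Or.inr ?_
    have hq : N / x * x = N := Int.ediv_mul_cancel hdvd
    have hq1 : 1 ≤ N / x := by
      rw [Int.le_ediv_iff_mul_le (by omega : (0:Int) < x)]; omega
    rcases le_total x (N / x) with hle | hle
    · exact ⟨x, h1, by nlinarith, Int.emod_eq_zero_of_dvd hdvd, Or.inl rfl⟩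
    · refine ⟨N / x, hq1, by nlinarith, Int.emod_eq_zero_of_dvd ⟨x, by omega⟩, Or.inr ?_⟩
      have hx : N / (N / x) = x := by
        calc N / (N / x) = N / x * x / (N / x) := by rw [hq]
          _ = x := Int.mul_ediv_cancel_left x (by omega : N / x ≠ 0)
      exact hx.symm

lemma vs_eq_strict : ∀ (l₁ l₂ : List (Int × Int × Int)), l₁.Pairwise vsR → l₂.Pairwise vsR →
    (∀ x, x ∈ l₁ ↔ x ∈ l₂) → l₁ = l₂ := by
  intro l₁
  induction l₁ with
  | nil =>
    intro l₂ _ _ hmem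
    cases l₂ with
    | nil => rfl
    | cons b u => exact absurd ((hmem b).mpr (List.mem_cons_self)) (by simp)
  | cons a t ih =>
    intro l₂ h₁ h₂ hmem
    cases l₂ with
    | nil => exact absurd ((hmem a).mp (List.mem_cons_self)) (by simp)
    | cons b u =>
      have hat := (List.pairwise_cons.mp h₁).1
      have hbu := (List.pairwise_cons.mp h₂).1
      have hab : a = b := by
        have hbIn : b ∈ a :: t := (hmem b).mpr List.mem_cons_self
        have haIn : a ∈ b :: u := (hmem a).mp List.mem_cons_self
        rcases List.mem_cons.mp hbIn with h | h
        · exact h.symm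
        · rcases List.mem_cons.mp haIn with h' | h'
          · exact h'
          · exact absurd (hat b h) (by have := hbu a h'; unfold vsR at *; omega)
      subst hab
      have : t = u := by
        apply ih u (List.pairwise_cons.mp h₁).2 (List.pairwise_cons.mp h₂).2
        intro x
        constructor
        · intro hx
          rcases List.mem_cons.mp ((hmem x).mp (List.mem_cons_of_mem a hx)) with h | h
          · exact absurd (hat x hx) (by rw [h]; unfold vsR; omega)
          · exact h
        · intro hx
          rcases List.mem_cons.mp ((hmem x).mpr (List.mem_cons_of_mem a hx)) with h | h
          · exact absurd (hbu x hx) (by rw [h]; unfold vsR; omega)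
          · exact h
      rw [this]

-- generic shape of B's output loop
lemma vsFoldB {α : Type} (P Q : Int → Prop) [DecidablePred P] [DecidablePred Q] (g : Int → α) :
    ∀ (l : List Int) (acc : List α),
      l.foldl (fun res m => if P m then (if Q m then res ++ [g m] else res) else res) acc
        = acc ++ (l.filter (fun m => decide (P m) && decide (Q m))).map g := by
  intro l
  induction l with
  | nil => intro acc; simp
  | cons a t ih =>
    intro acc
    simp only [List.foldl_cons, List.filter_cons]
    by_cases hP : P a
    · by_cases hQ : Q a
      · simp [hP, hQ, ih]
      · simp [hP, hQ, ih]
    · simp [hP, ih]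

-- the core equality, for an arbitrary bound M shared by the two programs
lemma vs_main (N M : Int) :
    vsLoopA N M 1 [] =
      if N ≤ 0 then ([] : List (Int × Int × Int))
      else (PySem.List.sorted (vsDivLoop N 1 PySem.Set.empty) (fun x => x) false).foldl
        (fun results m =>
          if m ≤ M ∧ m * (m - 1) ≤ N then
            if 0 < PySem.Int.floordiv N m - (m - 1) ∧
                PySem.Int.mod (PySem.Int.floordiv N m - (m - 1)) 2 = 1 then
              results ++ [(N, m, PySem.Int.floordiv N m - (m - 1))]
            else results
          else results) [] := by
  by_cases hN : N ≤ 0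
  · rw [if_pos hN, List.eq_nil_iff_forall_not_mem]
    intro x hx
    obtain ⟨m', -, hg, -⟩ := (vsLoopA_mem N M 1 (le_refl 1) x).mp hx
    have h1 := vsGd_le_N hg
    have h2 := hg.1
    omega
  · rw [if_neg hN,
      vsFoldB (fun m => m ≤ M ∧ m * (m - 1) ≤ N)
        (fun m => 0 < PySem.Int.floordiv N m - (m - 1) ∧
            PySem.Int.mod (PySem.Int.floordiv N m - (m - 1)) 2 = 1)
        (fun m => (N, m, PySem.Int.floordiv N m - (m - 1)))]
    have hnd : (vsDivLoop N 1 PySem.Set.empty).Nodup :=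
      vsDivLoop_nodup N 1 _ (by simp [PySem.Set.empty])
    have hperm := PySem.List.sorted_perm (vsDivLoop N 1 PySem.Set.empty) (fun x => x) false
    have hndS : (PySem.List.sorted (vsDivLoop N 1 PySem.Set.empty) (fun x => x) false).Nodup :=
      hperm.nodup_iff.mpr hnd
    have hle := PySem.List.sorted_pairwise (vsDivLoop N 1 PySem.Set.empty) (fun x => x)
    have hlt : (PySem.List.sorted (vsDivLoop N 1 PySem.Set.empty) (fun x => x) false).Pairwise
        (fun a b => a < b) := (hle.and hndS).imp (fun h => lt_of_le_of_ne h.1 h.2)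
    apply vs_eq_strict
    · exact vsLoopA_pairwise N M 1 (le_refl 1)
    · simp only [List.nil_append]
      rw [List.pairwise_map]
      exact (hlt.filter _).imp (fun h => by unfold vsR; simpa using h)
    · intro x
      rw [vsLoopA_mem N M 1 (le_refl 1) x]
      simp only [List.nil_append, List.mem_map, List.mem_filter, Bool.and_eq_true, decide_eq_true_eq,
        PySem.List.mem_sorted, vsDiv_char N (by omega)]
      constructor
      · rintro ⟨m', -, hg, hx⟩
        obtain ⟨g1, g2, g3, g4, g5, g6⟩ := hg
        have hdivconv : PySem.Int.floordiv N m' = N / m' :=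
          PySem.Int.floordiv_eq_ediv_of_pos (by omega : (0:Int) < m')
        refine ⟨m', ⟨⟨Int.dvd_of_emod_eq_zero g4, g1, vsGd_le_N ⟨g1, g2, g3, g4, g5, g6⟩⟩,
          ⟨g2, g3⟩, ?_⟩, ?_⟩
        · rw [hdivconv, PySem.Int.mod_eq_emod_of_pos (by omega : (0:Int) < 2)]
          exact ⟨g5, g6⟩
        · rw [hx, hdivconv]; rfl
      · rintro ⟨m', ⟨⟨hdvd, h1, h2⟩, ⟨hM, hmm⟩, hQ⟩, hx⟩
        have hdivconv : PySem.Int.floordiv N m' = N / m' :=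
          PySem.Int.floordiv_eq_ediv_of_pos (by omega : (0:Int) < m')
        rw [hdivconv, PySem.Int.mod_eq_emod_of_pos (by omega : (0:Int) < 2)] at hQ
        exact ⟨m', h1, ⟨h1, hM, hmm, Int.emod_eq_zero_of_dvd hdvd, hQ.1, hQ.2⟩,
          by rw [← hx, hdivconv]; rfl⟩

-- ===== VERDICT (by name: the statement is the Claim_ definition above) =====
theorem valid_sequences_spec : Claim_equal_valid_sequences := by
  intro N max_m _ _
  show valid_sequences N max_m = valid_sequences_alt N max_m
  cases max_m with
  | none => exact vs_main N _
  | some v => exact vs_main N v
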